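-- pv_equiv track=rewrite | github.com/nikulin-anton/python-contest | contest/part_3/H.py | get_variants_count
-- ===== SOURCE A (Python) =====
-- def get_variants_count(message):
--     if "w" in message or "m" in message:
--         return 0
--
--     if len(message) == 1:
--         return 1
--
--     MODULO = 10 ** 9 + 7
--     dp = [None] * len(message)
--     dp[0] = 1
--     dp[1] = 2 if message.startswith("nn") or message.startswith("uu") else 1
--
--     for i in range(2, len(message)):
--         if (message[i] == "n" or message[i] == "u") and message[i] == message[i - 1]:
--             dp[i] = (dp[i - 1] + dp[i - 2]) % MODULO
--         else:
--             dp[i] = (dp[i - 1]) % MODULO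
--
--     return dp[-1]
-- ===== SOURCE B (Python) =====
-- def fib_mod(k):
--     MOD = 10 ** 9 + 7
--     a, b = 0, 1
--     for _ in range(k):
--         a, b = b, (a + b) % MOD
--     return a
--
--
-- def get_variants_count(message):
--     if "w" in message or "m" in message:
--         return 0
--     MOD = 10 ** 9 + 7
--     result = 1
--     n = len(message)
--     i = 0
--     while i < n:
--         c = message[i]
--         j = i + 1
--         while j < n and message[j] == c:
--             j += 1
--         if c in "nu":
--             result = result * fib_mod(j - i + 1) % MOD
--         i = j
--     return result
-- ===== Notes on version B (the rewrite author's own statement) =====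
-- stated objective: alternative
-- what changed: B replaces A's per-character dp[] scan (three-case linear DP over indices) by scanning the string into maximal runs of identical characters and multiplying Fibonacci(run_length+1) mod 10**9+7 for each 'n'/'u' run.
import Mathlib
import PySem

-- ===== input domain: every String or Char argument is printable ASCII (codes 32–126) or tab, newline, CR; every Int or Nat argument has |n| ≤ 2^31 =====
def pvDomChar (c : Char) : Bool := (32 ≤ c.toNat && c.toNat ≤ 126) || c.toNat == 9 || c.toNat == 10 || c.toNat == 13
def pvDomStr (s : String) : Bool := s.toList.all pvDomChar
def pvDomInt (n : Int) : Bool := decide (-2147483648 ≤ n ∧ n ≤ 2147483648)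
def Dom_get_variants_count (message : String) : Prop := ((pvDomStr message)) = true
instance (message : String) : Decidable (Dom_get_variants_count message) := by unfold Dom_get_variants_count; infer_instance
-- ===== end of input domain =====

-- B replaces A's per-character DP over the string by a product over maximal runs of
-- Fibonacci numbers computed mod 10**9+7 (objective: alternative algorithm, similar cost).

-- ===== PORT A =====
-- loop body of A's `for i in range(2, len(message))` (MODULO = 10**9+7 is positive,
-- so Python's `%` coincides with Lean's Int.emod `%`)
def aStep (cs : List Char) (dp : List (Option Int)) (i : Int) : List (Option Int) :=
  if (PySem.List.pyGetD cs i ' ' == 'n' || PySem.List.pyGetD cs i ' ' == 'u')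
      && (PySem.List.pyGetD cs i ' ' == PySem.List.pyGetD cs (i - 1) ' ') then
    PySem.List.pySetD dp i (some (((PySem.List.pyGetD dp (i - 1) none).getD 0
      + (PySem.List.pyGetD dp (i - 2) none).getD 0) % (10 ^ 9 + 7)))
  else
    PySem.List.pySetD dp i (some ((PySem.List.pyGetD dp (i - 1) none).getD 0 % (10 ^ 9 + 7)))

def get_variants_count (message : String) : Int :=
  if PySem.Str.isIn "w" message || PySem.Str.isIn "m" message then 0
  else if PySem.Str.len message = 1 then 1
  else
    let cs : List Char := message.toList
    let dp0 : List (Option Int) := List.replicate cs.length none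
    let dp1 := PySem.List.pySetD dp0 0 (some 1)
    let dp2 := PySem.List.pySetD dp1 1
      (some (if PySem.Str.startswith message "nn" || PySem.Str.startswith message "uu" then (2 : Int) else 1))
    let dpf := (PySem.List.pyRange 2 (PySem.Str.len message)).foldl (aStep cs) dp2
    (PySem.List.pyGetD dpf (-1) none).getD 0

-- ===== PORT B =====
-- fib_mod(k): iterative Fibonacci pair, reduced mod 10**9+7 at every step
def pvFibMod (k : Int) : Int :=
  ((PySem.List.pyRange 0 k).foldl
    (fun (ab : Int × Int) _ => (ab.2, (ab.1 + ab.2) % (10 ^ 9 + 7))) (0, 1)).1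

-- B's `while i < n:` loop: consume one maximal run per iteration (the inner
-- `while j < n and message[j] == c` scan is the takeWhile, advancing `i = j` the dropWhile)
def pvRunLoop : List Char → Int → Int
  | [], result => result
  | c :: rest, result =>
      let k : Int := 1 + ((rest.takeWhile (fun x => x == c)).length : Int)
      let result' := if c == 'n' || c == 'u'
        then result * pvFibMod (k + 1) % (10 ^ 9 + 7) else result
      pvRunLoop (rest.dropWhile (fun x => x == c)) result'
termination_by cs _ => cs.length
decreasing_by simpa using Nat.lt_succ_of_le (List.length_dropWhile_le _ rest)

def get_variants_count_alt (message : String) : Int :=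
  if PySem.Str.isIn "w" message || PySem.Str.isIn "m" message then 0
  else pvRunLoop message.toList 1

-- ===== PRECONDITION & SPEC =====
-- Pre_ excludes only the empty string, on which A raises IndexError (dp[0] = 1 on an empty dp).
def Pre_get_variants_count (message : String) : Prop := message.toList ≠ []
instance (message : String) : Decidable (Pre_get_variants_count message) := by
  unfold Pre_get_variants_count; infer_instance
def pvWitness_get_variants_count : String := "nn"

def Spec_get_variants_count (message : String) (out : Int) : Prop := out = get_variants_count_alt message
instance (message : String) (out : Int) : Decidable (Spec_get_variants_count message out) := by
  unfold Spec_get_variants_count; infer_instance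

-- ===== CLAIM (what is proved, stated in full; the proofs are below) =====
def Claim_equal_get_variants_count : Prop := ∀ (message : String), Dom_get_variants_count message → Pre_get_variants_count message → Spec_get_variants_count message (get_variants_count message)

-- ===== LEMMAS AND PROOFS =====

def nuC (c : Char) : Bool := c == 'n' || c == 'u'

def fibZ (n : Nat) : Int := (Nat.fib n : Int)

-- the value A's dp list carries at index i
def valA (cs : List Char) : Nat → Int
  | 0 => 1
  | 1 => if (cs.getD 1 ' ' == cs.getD 0 ' ') && nuC (cs.getD 0 ' ') then 2 else 1
  | (i + 2) =>
      if nuC (cs.getD (i + 2) ' ') && (cs.getD (i + 2) ' ' == cs.getD (i + 1) ' ')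
      then (valA cs (i + 1) + valA cs i) % (10 ^ 9 + 7)
      else valA cs (i + 1) % (10 ^ 9 + 7)

-- A's loop as a scalar recursion over the remaining characters (state: prev char, dp[i-1], dp[i-2])
def scalarA : List Char → Char → Int → Int → Int
  | [], _, a, _ => a
  | c :: rest, p, a, b =>
      if nuC c && (c == p) then scalarA rest c ((a + b) % (10 ^ 9 + 7)) a
      else scalarA rest c (a % (10 ^ 9 + 7)) a

-- the same recursion without the modular reduction
def pureA : List Char → Char → Int → Int → Int
  | [], _, a, _ => a
  | c :: rest, p, a, b => if nuC c && (c == p) then pureA rest c (a + b) a else pureA rest c a a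

-- exact (un-reduced) run product, char by char: inside a run of p of current length t
def Ncont : List Char → Char → Nat → Int
  | [], p, t => if nuC p then fibZ (t + 1) else 1
  | c :: rest, p, t =>
      if nuC c && (c == p) then Ncont rest c (t + 1)
      else (if nuC p then fibZ (t + 1) else 1) * Ncont rest c 1

-- exact (un-reduced) run product, run by run (B's loop shape)
def Nrun : List Char → Int
  | [] => 1
  | c :: rest =>
      (if nuC c then fibZ ((rest.takeWhile (fun x => x == c)).length + 2) else 1)
        * Nrun (rest.dropWhile (fun x => x == c))
termination_by cs => cs.length
decreasing_by simpa using Nat.lt_succ_of_le (List.length_dropWhile_le _ rest)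

-- dp list contents after the loop has filled indices < k
def dpState (cs : List Char) (k : Nat) : List (Option Int) :=
  (List.range cs.length).map (fun j => if j < k then some (valA cs j) else none)

lemma fibZ_add_two (n : Nat) : fibZ (n + 2) = fibZ (n + 1) + fibZ n := by
  simp [fibZ, Nat.fib_add_two]; ring

lemma fibZ_one : fibZ 1 = 1 := rfl
lemma fibZ_two : fibZ 2 = 1 := rfl
lemma fibZ_three : fibZ 3 = 2 := rfl

lemma pvFibMod_fold (k : Nat) :
    ∃ a b : Int,
      ((PySem.List.pyRange 0 (k : Int)).foldl
        (fun (ab : Int × Int) _ => (ab.2, (ab.1 + ab.2) % (10 ^ 9 + 7))) (0, 1)) = (a, b) ∧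
      a % (10 ^ 9 + 7) = fibZ k % (10 ^ 9 + 7) ∧ b % (10 ^ 9 + 7) = fibZ (k + 1) % (10 ^ 9 + 7) ∧
      0 ≤ a ∧ a < 10 ^ 9 + 7 ∧ 0 ≤ b ∧ b < 10 ^ 9 + 7 := by
  induction k with
  | zero =>
      refine ⟨0, 1, ?_, by norm_num [fibZ], by norm_num [fibZ], by norm_num, by norm_num, by norm_num, by norm_num⟩
      norm_num [PySem.List.pyRange]
  | succ k ih =>
      obtain ⟨a, b, hfold, ha, hb, ha0, ha1, hb0, hb1⟩ := ih
      have hrange : PySem.List.pyRange 0 ((k : Int) + 1) = PySem.List.pyRange 0 (k : Int) ++ [(k : Int)] :=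
        PySem.List.pyRange_one_succ_right (by positivity)
      refine ⟨b, (a + b) % (10 ^ 9 + 7), ?_, hb, ?_, hb0, hb1,
        Int.emod_nonneg _ (by norm_num), Int.emod_lt_of_pos _ (by norm_num)⟩
      · have hc1 : ((k + 1 : Nat) : Int) = (k : Int) + 1 := by push_cast; ring
        rw [hc1, hrange, List.foldl_append, hfold]; simp [List.foldl]
      · rw [Int.emod_emod_of_dvd _ dvd_rfl, Int.add_emod, ha, hb, ← Int.add_emod, fibZ_add_two]
        ring_nf

lemma pvFibMod_spec (k : Nat) :
    pvFibMod (k : Int) % (10 ^ 9 + 7) = fibZ k % (10 ^ 9 + 7) ∧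
      0 ≤ pvFibMod (k : Int) ∧ pvFibMod (k : Int) < 10 ^ 9 + 7 := by
  obtain ⟨a, b, hfold, ha, hb, ha0, ha1, hb0, hb1⟩ := pvFibMod_fold k
  unfold pvFibMod
  rw [hfold]
  exact ⟨ha, ha0, ha1⟩

lemma pvRunLoop_spec : ∀ (n : Nat) (cs : List Char), cs.length ≤ n → ∀ r : Int,
    0 ≤ r → r < 10 ^ 9 + 7 →
    pvRunLoop cs r % (10 ^ 9 + 7) = (r * Nrun cs) % (10 ^ 9 + 7) ∧
      0 ≤ pvRunLoop cs r ∧ pvRunLoop cs r < 10 ^ 9 + 7 := by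
  intro n
  induction n with
  | zero =>
      intro cs hlen r hr0 hr1
      have : cs = [] := List.length_eq_zero_iff.mp (Nat.le_zero.mp hlen)
      subst this
      exact ⟨by simp [pvRunLoop, Nrun], by simpa [pvRunLoop] using hr0, by simpa [pvRunLoop] using hr1⟩
  | succ n ih =>
      intro cs hlen r hr0 hr1
      match cs with
      | [] =>
          exact ⟨by simp [pvRunLoop, Nrun], by simpa [pvRunLoop] using hr0, by simpa [pvRunLoop] using hr1⟩
      | c :: rest =>
          simp only [pvRunLoop]
          set L : Nat := (rest.takeWhile (fun x => x == c)).length with hL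
          have htl : (rest.dropWhile (fun x => x == c)).length ≤ n := by
            have := List.length_dropWhile_le (fun x => x == c) rest
            simp only [List.length_cons] at hlen
            omega
          by_cases hc : (c == 'n' || c == 'u') = true
          · rw [if_pos hc]
            have hcast : (1 + (L : Int)) + 1 = ((L + 2 : Nat) : Int) := by push_cast; ring
            rw [hcast]
            obtain ⟨hfib, hf0, hf1⟩ := pvFibMod_spec (L + 2)
            have hr'0 : 0 ≤ r * pvFibMod ((L + 2 : Nat) : Int) % (10 ^ 9 + 7) :=
              Int.emod_nonneg _ (by norm_num)
            have hr'1 : r * pvFibMod ((L + 2 : Nat) : Int) % (10 ^ 9 + 7) < 10 ^ 9 + 7 :=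
              Int.emod_lt_of_pos _ (by norm_num)
            obtain ⟨hmod, hb0, hb1⟩ := ih _ htl _ hr'0 hr'1
            refine ⟨?_, hb0, hb1⟩
            rw [hmod]
            have hnu : nuC c = true := hc
            simp only [Nrun, hnu, if_pos]
            rw [Int.mul_emod, Int.emod_emod_of_dvd _ dvd_rfl, Int.mul_emod r, hfib,
              ← Int.mul_emod r, ← Int.mul_emod, hL]
            ring_nf
          · rw [if_neg hc]
            obtain ⟨hmod, hb0, hb1⟩ := ih _ htl r hr0 hr1
            refine ⟨?_, hb0, hb1⟩
            rw [hmod]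
            have hnu : nuC c = false := by simpa [nuC] using hc
            simp [Nrun, hnu]

lemma pureA_eq_Ncont : ∀ (cs : List Char) (p : Char) (r a b : Int) (t : Nat),
    (nuC p = true → a = r * fibZ (t + 1) ∧ b = r * fibZ t) →
    (nuC p = false → a = r) →
    pureA cs p a b = r * Ncont cs p t := by
  intro cs
  induction cs with
  | nil =>
      intro p r a b t h1 h2
      simp only [pureA, Ncont]
      cases hnu : nuC p
      · simpa using h2 hnu
      · simpa using (h1 hnu).1
  | cons c rest ih =>
      intro p r a b t h1 h2
      simp only [pureA, Ncont]
      by_cases hc : (nuC c && (c == p)) = true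
      · rw [if_pos hc, if_pos hc]
        have hcp : c = p := by
          have := (Bool.and_elim_right hc); exact eq_of_beq this
        have hnc : nuC c = true := Bool.and_elim_left hc
        have hnp : nuC p = true := hcp ▸ hnc
        obtain ⟨hA, hB⟩ := h1 hnp
        refine ih c r (a + b) a (t + 1) ?_ ?_
        · intro _
          constructor
          · rw [hA, hB, fibZ_add_two]; ring
          · exact hA
        · intro hfalse; rw [hnc] at hfalse; exact absurd hfalse (by simp)
      · rw [if_neg hc, if_neg hc]
        have har : a = r * (if nuC p then fibZ (t + 1) else 1) := by
          cases hnu : nuC p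
          · simpa using h2 hnu
          · simpa using (h1 hnu).1
        rw [mul_comm r, mul_assoc]
        refine ih c ((if nuC p = true then fibZ (t + 1) else 1) * r) a a 1 ?_ ?_ |>.trans (by ring_nf)
        · intro _
          constructor
          · rw [har, fibZ_two]; ring
          · rw [har, fibZ_one]; ring
        · intro _; rw [har]; ring

lemma Ncont_eq_Nrun : ∀ (n : Nat) (cs : List Char), cs.length ≤ n → ∀ (p : Char) (t : Nat),
    (nuC p = true → Ncont cs p t =
      fibZ (t + (cs.takeWhile (fun x => x == p)).length + 1) * Nrun (cs.dropWhile (fun x => x == p)))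
    ∧ (nuC p = false → Ncont cs p t = Nrun (cs.dropWhile (fun x => x == p))) := by
  intro n
  induction n with
  | zero =>
      intro cs hlen p t
      have : cs = [] := List.length_eq_zero_iff.mp (Nat.le_zero.mp hlen)
      subst this
      constructor
      · intro h; simp [Ncont, Nrun, h]
      · intro h; simp [Ncont, Nrun, h]
  | succ n ih =>
      intro cs hlen p t
      match cs with
      | [] =>
          constructor
          · intro h; simp [Ncont, Nrun, h]
          · intro h; simp [Ncont, Nrun, h]
      | c :: rest =>
          have hrest : rest.length ≤ n := by simp at hlen; omega
          -- sub-fact: Ncont rest c 1 = Nrun (c :: rest)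
          have S : Ncont rest c 1 = Nrun (c :: rest) := by
            cases hnc : nuC c with
            | true =>
                have := (ih rest hrest c 1).1 hnc
                rw [this, Nrun]
                rw [hnc, if_pos rfl]
                congr 2
                omega
            | false =>
                have := (ih rest hrest c 1).2 hnc
                rw [this, Nrun, hnc]
                simp
          by_cases hcp : (c == p) = true
          · have hc : c = p := eq_of_beq hcp
            subst hc
            constructor
            · intro hnp
              have hcond : (nuC c && (c == c)) = true := by simp [hnp]
              rw [Ncont, if_pos hcond]
              have := (ih rest hrest c (t + 1)).1 hnp
              rw [this]
              simp only [List.takeWhile_cons, List.dropWhile_cons, beq_self_eq_true, if_pos]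
              simp only [List.length_cons]
              congr 2
              omega
            · intro hnp
              have hcond : (nuC c && (c == c)) = false := by simp [hnp]
              rw [Ncont, if_neg (by simp [hnp])]
              have := (ih rest hrest c 1).2 hnp
              rw [hnp]
              simp only [if_neg (by simp : ¬ (false = true))]
              rw [one_mul, this]
              simp only [List.dropWhile_cons, beq_self_eq_true]
              simp
          · have hcond : (nuC c && (c == p)) = false := by simp [hcp]
            have hdrop : (c :: rest).dropWhile (fun x => x == p) = c :: rest := by
              simp [hcp]
            have htake : (c :: rest).takeWhile (fun x => x == p) = [] := by
              simp [hcp]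
            constructor
            · intro hnp
              rw [Ncont, if_neg (by simp [hcond]), hnp]
              rw [hdrop, htake, ← S]
              simp
            · intro hnp
              rw [Ncont, if_neg (by simp [hcond]), hnp]
              rw [hdrop, ← S]
              simp

lemma Ncont_head (c : Char) (rest : List Char) : Ncont rest c 1 = Nrun (c :: rest) := by
  cases hnc : nuC c with
  | true =>
      have := (Ncont_eq_Nrun rest.length rest le_rfl c 1).1 hnc
      rw [this, Nrun, hnc, if_pos rfl]
      congr 2
      omega
  | false =>
      have := (Ncont_eq_Nrun rest.length rest le_rfl c 1).2 hnc
      rw [this, Nrun, hnc]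
      simp

lemma pureA_head (c0 c1 : Char) (rest : List Char) :
    pureA rest c1 (if (c1 == c0) && nuC c0 then 2 else 1) 1 = Nrun (c0 :: c1 :: rest) := by
  rw [← Ncont_head c0 (c1 :: rest), Ncont]
  by_cases hc : (nuC c1 && (c1 == c0)) = true
  · have hcp : c1 = c0 := eq_of_beq (Bool.and_elim_right hc)
    have hn1 : nuC c1 = true := Bool.and_elim_left hc
    have hn0 : nuC c0 = true := hcp ▸ hn1
    rw [if_pos hc]
    have hinit : (if (c1 == c0) && nuC c0 then (2:Int) else 1) = 2 := by
      rw [if_pos (by simp [hcp, hn0])]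
    rw [hinit]
    have := pureA_eq_Ncont rest c1 1 2 1 2
      (fun _ => ⟨by rw [fibZ_three]; ring, by rw [fibZ_two]; ring⟩)
      (fun h => absurd h (by simp [hn1]))
    rw [this, one_mul]
  · have hinit : (if (c1 == c0) && nuC c0 then (2:Int) else 1) = 1 := by
      by_cases h10 : (c1 == c0) = true
      · have h1f : nuC c1 = false := by
          cases hn : nuC c1
          · rfl
          · exact absurd (by simp [hn, h10]) hc
        have h0f : nuC c0 = false := by rw [← eq_of_beq h10]; exact h1f
        simp [h0f]
      · simp [h10]
    rw [hinit, if_neg hc]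
    have := pureA_eq_Ncont rest c1 1 1 1 1
      (fun _ => ⟨by rw [fibZ_two]; ring, by rw [fibZ_one]; ring⟩)
      (fun _ => rfl)
    rw [this, one_mul, fibZ_two]
    simp

lemma scalarA_bounds : ∀ (cs : List Char) (p : Char) (a b : Int),
    0 ≤ a → a < 10 ^ 9 + 7 → 0 ≤ scalarA cs p a b ∧ scalarA cs p a b < 10 ^ 9 + 7 := by
  intro cs
  induction cs with
  | nil => intro p a b h1 h2; simpa [scalarA] using ⟨h1, h2⟩
  | cons c rest ih =>
      intro p a b h1 h2
      simp only [scalarA]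
      split
      · exact ih c _ a (Int.emod_nonneg _ (by norm_num)) (Int.emod_lt_of_pos _ (by norm_num))
      · exact ih c _ a (Int.emod_nonneg _ (by norm_num)) (Int.emod_lt_of_pos _ (by norm_num))

lemma scalarA_mod : ∀ (cs : List Char) (p : Char) (a b a' b' : Int),
    a % (10 ^ 9 + 7) = a' % (10 ^ 9 + 7) → b % (10 ^ 9 + 7) = b' % (10 ^ 9 + 7) →
    scalarA cs p a b % (10 ^ 9 + 7) = pureA cs p a' b' % (10 ^ 9 + 7) := by
  intro cs
  induction cs with
  | nil => intro p a b a' b' ha hb; simpa [scalarA, pureA] using ha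
  | cons c rest ih =>
      intro p a b a' b' ha hb
      simp only [scalarA, pureA]
      split
      · refine ih c _ a _ a' ?_ ha
        rw [Int.emod_emod_of_dvd _ dvd_rfl, Int.add_emod, ha, hb, ← Int.add_emod]
      · refine ih c _ a _ a' ?_ ha
        rw [Int.emod_emod_of_dvd _ dvd_rfl, ha]

lemma dpState_getD (cs : List Char) (k j : Nat) (hj : j < cs.length) :
    (dpState cs k).getD j none = if j < k then some (valA cs j) else none := by
  simp [dpState, List.getD_eq_getElem?_getD, hj]

lemma dpState_set (cs : List Char) (k : Nat) (_hk : k < cs.length) :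
    (dpState cs k).set k (some (valA cs k)) = dpState cs (k + 1) := by
  apply List.ext_getElem
  · simp [dpState]
  · intro j h1 h2
    simp only [dpState, List.getElem_set, List.getElem_map, List.getElem_range]
    split_ifs <;> first | rfl | omega | (rename_i h _; subst h; rfl)

lemma dp_step (cs : List Char) (k : Nat) (h2 : 2 ≤ k) (hk : k < cs.length) :
    aStep cs (dpState cs k) (k : Int) = dpState cs (k + 1) := by
  obtain ⟨i, rfl⟩ : ∃ i, k = i + 2 := ⟨k - 2, by omega⟩
  unfold aStep
  have e1 : ((i + 2 : Nat) : Int) - 1 = ((i + 1 : Nat) : Int) := by push_cast; ring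
  have e2 : ((i + 2 : Nat) : Int) - 2 = ((i : Nat) : Int) := by push_cast; ring
  rw [e1, e2]
  simp only [PySem.List.pyGetD_natCast, PySem.List.pySetD_natCast]
  have hval : valA cs (i + 2) =
      if nuC (cs.getD (i + 2) ' ') && (cs.getD (i + 2) ' ' == cs.getD (i + 1) ' ')
      then (valA cs (i + 1) + valA cs i) % (10 ^ 9 + 7)
      else valA cs (i + 1) % (10 ^ 9 + 7) := by rw [valA]
  by_cases hcond : ((cs.getD (i + 2) ' ' == 'n' || cs.getD (i + 2) ' ' == 'u')
      && (cs.getD (i + 2) ' ' == cs.getD (i + 1) ' ')) = true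
  · rw [if_pos hcond, dpState_getD cs (i + 2) (i + 1) (by omega),
      dpState_getD cs (i + 2) i (by omega),
      if_pos (show i + 1 < i + 2 by omega), if_pos (show i < i + 2 by omega)]
    simp only [Option.getD_some]
    have : valA cs (i + 2) = (valA cs (i + 1) + valA cs i) % (10 ^ 9 + 7) := by
      rw [hval, if_pos (by simpa [nuC] using hcond)]
    rw [← this, dpState_set cs (i + 2) hk]
  · rw [if_neg hcond, dpState_getD cs (i + 2) (i + 1) (by omega),
      if_pos (show i + 1 < i + 2 by omega)]
    simp only [Option.getD_some]
    have : valA cs (i + 2) = valA cs (i + 1) % (10 ^ 9 + 7) := by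
      rw [hval, if_neg (by simpa [nuC] using hcond)]
    rw [← this, dpState_set cs (i + 2) hk]

lemma dp_fold : ∀ (m : Nat) (cs : List Char) (k : Nat), 2 ≤ k → k + m = cs.length →
    (PySem.List.pyRange (k : Int) (cs.length : Int)).foldl (aStep cs) (dpState cs k)
      = dpState cs cs.length := by
  intro m
  induction m with
  | zero =>
      intro cs k h2 hkm
      have hk : k = cs.length := by omega
      subst hk
      have h0 : PySem.List.pyRange ((cs.length : Nat) : Int) ((cs.length : Nat) : Int) = [] := by
        simp [PySem.List.pyRange]
      rw [h0]
      rfl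
  | succ m ih =>
      intro cs k h2 hkm
      have hlt : (k : Int) < (cs.length : Int) := by exact_mod_cast (by omega : k < cs.length)
      rw [PySem.List.pyRange_one_cons hlt]
      rw [List.foldl_cons, dp_step cs k h2 (by omega)]
      have : (k : Int) + 1 = ((k + 1 : Nat) : Int) := by push_cast; ring
      rw [this, ih cs (k + 1) (by omega) (by omega)]

lemma dp_init (cs : List Char) (_h2 : 2 ≤ cs.length) (d1 : Int) (hd1 : d1 = valA cs 1) :
    PySem.List.pySetD (PySem.List.pySetD (List.replicate cs.length none) 0 (some 1)) 1 (some d1)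
      = dpState cs 2 := by
  subst hd1
  rw [PySem.List.pySetD_of_nonneg _ _ (show (0:Int) ≤ 1 by norm_num),
    PySem.List.pySetD_of_nonneg _ _ (show (0:Int) ≤ 0 by norm_num)]
  norm_num
  apply List.ext_getElem
  · simp [dpState]
  · intro j h1 h2
    simp only [dpState, List.getElem_set, List.getElem_map, List.getElem_range,
      List.getElem_replicate]
    rcases j with _ | _ | j <;> simp [valA]


lemma valA_scalar : ∀ (m : Nat) (cs : List Char) (j : Nat), 2 ≤ j → j + m = cs.length →
    scalarA (cs.drop j) (cs.getD (j - 1) ' ') (valA cs (j - 1)) (valA cs (j - 2))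
      = valA cs (cs.length - 1) := by
  intro m
  induction m with
  | zero =>
      intro cs j h2 hj
      have hjl : j = cs.length := by omega
      subst hjl
      rw [List.drop_of_length_le le_rfl]
      rfl
  | succ m ih =>
      intro cs j h2 hj
      have hjlt : j < cs.length := by omega
      obtain ⟨i, rfl⟩ : ∃ i, j = i + 2 := ⟨j - 2, by omega⟩
      rw [List.drop_eq_getElem_cons hjlt]
      have hg : cs[i + 2] = cs.getD (i + 2) ' ' := (List.getD_eq_getElem cs ' ' hjlt).symm
      simp only [scalarA, hg]
      have hs1 : i + 2 - 1 = i + 1 := rfl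
      have hs2 : i + 2 - 2 = i := rfl
      rw [hs1, hs2]
      have hval : valA cs (i + 2) =
          if nuC (cs.getD (i + 2) ' ') && (cs.getD (i + 2) ' ' == cs.getD (i + 1) ' ')
          then (valA cs (i + 1) + valA cs i) % (10 ^ 9 + 7)
          else valA cs (i + 1) % (10 ^ 9 + 7) := by rw [valA]
      have ihx := ih cs (i + 3) (by omega) (by omega)
      have hs3 : i + 3 - 1 = i + 2 := rfl
      have hs4 : i + 3 - 2 = i + 1 := rfl
      rw [hs3, hs4] at ihx
      by_cases hcond : (nuC (cs.getD (i + 2) ' ')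
          && (cs.getD (i + 2) ' ' == cs.getD (i + 1) ' ')) = true
      · rw [if_pos hcond]
        rw [show (valA cs (i + 1) + valA cs i) % (10 ^ 9 + 7) = valA cs (i + 2) from by
          rw [hval, if_pos hcond]]
        exact ihx
      · rw [if_neg hcond]
        rw [show valA cs (i + 1) % (10 ^ 9 + 7) = valA cs (i + 2) from by
          rw [hval, if_neg hcond]]
        exact ihx

lemma d1_eq (message : String) (c0 c1 : Char) (rest : List Char)
    (hm : message.toList = c0 :: c1 :: rest) :
    (if PySem.Str.startswith message "nn" || PySem.Str.startswith message "uu"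
      then (2 : Int) else 1) = valA message.toList 1 := by
  rw [hm]
  have hvr : valA (c0 :: c1 :: rest) 1 = if (c1 == c0) && nuC c0 then 2 else 1 := by
    simp [valA, List.getD]
  rw [hvr]
  have hnn : ("nn" : String).toList = ['n', 'n'] := by decide
  have huu : ("uu" : String).toList = ['u', 'u'] := by decide
  rw [PySem.Str.startswith_eq, PySem.Str.startswith_eq, hm, hnn, huu]
  have hcond : (PySem.Chars.startswith (c0 :: c1 :: rest) ['n', 'n']
      || PySem.Chars.startswith (c0 :: c1 :: rest) ['u', 'u']) = ((c1 == c0) && nuC c0) := by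
    simp only [PySem.Chars.startswith, List.isPrefixOf, Bool.and_true]
    by_cases h0 : c0 = 'n'
    · subst h0
      by_cases h1 : c1 = 'n' <;> simp [h1, nuC, eq_comm]
    · by_cases h0u : c0 = 'u'
      · subst h0u
        by_cases h1 : c1 = 'u' <;> simp [h1, nuC, eq_comm]
      · have hn : ('n' == c0) = false := by simp [Ne.symm h0]
        have hu : ('u' == c0) = false := by simp [Ne.symm h0u]
        simp [hn, hu, nuC, h0, h0u]
  rw [hcond]

-- ===== VERDICT (by name: the statement is the Claim_ definition above) =====
theorem get_variants_count_spec : Claim_equal_get_variants_count := by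
  unfold Claim_equal_get_variants_count
  intro message _ hpre
  unfold Spec_get_variants_count get_variants_count get_variants_count_alt
  by_cases hw : (PySem.Str.isIn "w" message || PySem.Str.isIn "m" message) = true
  · rw [if_pos hw, if_pos hw]
  · rw [if_neg hw, if_neg hw]
    cases hml : message.toList with
    | nil => exact absurd hml hpre
    | cons c0 tl =>
      cases tl with
      | nil =>
          rw [if_pos (by rw [PySem.Str.len_eq, hml]; rfl)]
          have hf : pvFibMod 2 = 1 := by decide
          rw [pvRunLoop]
          simp only [List.takeWhile_nil, List.length_nil, List.dropWhile_nil, Nat.cast_zero]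
          rw [pvRunLoop]
          by_cases hcu : (c0 == 'n' || c0 == 'u') = true
          · rw [if_pos hcu]; norm_num [hf]
          · rw [if_neg hcu]
      | cons c1 rest =>
          have hlen1 : ¬ (PySem.Str.len message = 1) := by
            rw [PySem.Str.len_eq, hml]; simp only [List.length_cons]; intro h; push_cast at h; omega
          rw [if_neg hlen1]
          show (PySem.List.pyGetD
              ((PySem.List.pyRange 2 (PySem.Str.len message)).foldl (aStep (c0 :: c1 :: rest))
                (PySem.List.pySetD
                  (PySem.List.pySetD (List.replicate (c0 :: c1 :: rest).length none) 0 (some 1)) 1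
                  (some (if PySem.Str.startswith message "nn" || PySem.Str.startswith message "uu"
                    then (2 : Int) else 1))))
              (-1) none).getD 0 = pvRunLoop (c0 :: c1 :: rest) 1
          rw [d1_eq message c0 c1 rest hml, PySem.Str.len_eq, hml]
          rw [dp_init (c0 :: c1 :: rest) (by simp) _ rfl]
          rw [show (2 : Int) = ((2 : Nat) : Int) from by norm_num]
          rw [dp_fold rest.length (c0 :: c1 :: rest) 2 (by norm_num) (by rw [List.length_cons, List.length_cons]; omega)]
          have hgoal : (PySem.List.pyGetD
                (dpState (c0 :: c1 :: rest) (c0 :: c1 :: rest).length) (-1) none).getD 0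
              = valA (c0 :: c1 :: rest) ((c0 :: c1 :: rest).length - 1) := by
            have hlen : (dpState (c0 :: c1 :: rest) (c0 :: c1 :: rest).length).length
                = (c0 :: c1 :: rest).length := by simp [dpState]
            rw [PySem.List.pyGetD_neg_ofNat _ 1 none (by norm_num) (by rw [hlen]; simp)]
            simp only [dpState, List.length_map, List.length_range, List.getElem_map,
              List.getElem_range]
            rw [if_pos (by simp)]
            rfl
          rw [hgoal, show (c0 :: c1 :: rest).length - 1 = rest.length + 1 from by simp]
          have hval1 : valA (c0 :: c1 :: rest) 1 = if (c1 == c0) && nuC c0 then 2 else 1 := by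
            simp [valA, List.getD]
          have hb1 : 0 ≤ valA (c0 :: c1 :: rest) 1 ∧ valA (c0 :: c1 :: rest) 1 < 10 ^ 9 + 7 := by
            rw [hval1]; split <;> norm_num
          have hscal := valA_scalar rest.length (c0 :: c1 :: rest) 2 (by norm_num)
            (by rw [List.length_cons, List.length_cons]; omega)
          norm_num at hscal
          have hv0 : valA (c0 :: c1 :: rest) 0 = 1 := rfl
          rw [hv0] at hscal
          obtain ⟨hA0, hA1⟩ := scalarA_bounds rest c1 (valA (c0 :: c1 :: rest) 1) 1 hb1.1 hb1.2
          have hAm := scalarA_mod rest c1 (valA (c0 :: c1 :: rest) 1) 1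
            (valA (c0 :: c1 :: rest) 1) 1 rfl rfl
          have hPh : pureA rest c1 (valA (c0 :: c1 :: rest) 1) 1 = Nrun (c0 :: c1 :: rest) := by
            rw [hval1]; exact pureA_head c0 c1 rest
          obtain ⟨hBm, hB0, hB1⟩ := pvRunLoop_spec (c0 :: c1 :: rest).length (c0 :: c1 :: rest)
            le_rfl 1 (by norm_num) (by norm_num)
          rw [one_mul] at hBm
          rw [← hscal]
          rw [(Int.emod_eq_of_lt hA0 hA1).symm, (Int.emod_eq_of_lt hB0 hB1).symm, hAm, hPh, hBm]
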